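-- pv_equiv track=rewrite | github.com/llylee994-ui/project-companion | src/permission_detector.py | _is_valid_file_path
-- ===== SOURCE A (Python) =====
-- def _is_valid_file_path(path: str) -> bool:
--     """检查是否为有效的文件路径"""
--     if not path or len(path) < 2:
--         return False
--
--     # 检查是否包含非法字符
--     illegal_chars = ['<', '>', ':', '"', '|', '?', '*']
--     for char in illegal_chars:
--         if char in path:
--             return False
--
--     # 检查文件扩展名
--     valid_extensions = [
--         '.py', '.js', '.ts', '.java', '.cpp', '.c', '.h',
--         '.html', '.css', '.md', '.txt', '.json', '.yaml',
--         '.yml', '.xml', '.csv', '.sql', '.sh', '.bat',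
--         '.exe', '.dll', '.so', '.dylib', '.cs', '.go',
--         '.rs', '.php', '.rb', '.pl', '.lua', '.swift',
--         '.kt', '.scala', '.m', '.mm', '.fs', '.vb'
--     ]
--
--     path_lower = path.lower()
--     for ext in valid_extensions:
--         if path_lower.endswith(ext):
--             return True
--
--     # 如果没有扩展名，检查是否看起来像路径
--     if '/' in path or '\\' in path:
--         # 简单的路径检查
--         parts = path.replace('\\', '/').split('/')
--         if len(parts) >= 2:
--             last_part = parts[-1]
--             if '.' in last_part:
--                 # 有扩展名但不在列表中
--                 return True
--             # 可能是目录
--             return True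
--
--     return False
-- ===== SOURCE B (Python) =====
-- _VALID_EXTENSIONS = frozenset([
--     '.py', '.js', '.ts', '.java', '.cpp', '.c', '.h',
--     '.html', '.css', '.md', '.txt', '.json', '.yaml',
--     '.yml', '.xml', '.csv', '.sql', '.sh', '.bat',
--     '.exe', '.dll', '.so', '.dylib', '.cs', '.go',
--     '.rs', '.php', '.rb', '.pl', '.lua', '.swift',
--     '.kt', '.scala', '.m', '.mm', '.fs', '.vb'
-- ])
--
--
-- def _is_valid_file_path(path: str) -> bool:
--     """检查是否为有效的文件路径"""
--     # one fused left-to-right scan: count chars, note illegal chars and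
--     # separators, and maintain the run of characters after the last '.'
--     n = 0
--     illegal = False
--     sep = False
--     ext = None  # characters after the most recent '.', or None if no '.' yet
--     for c in path:
--         n += 1
--         if c in '<>:"|?*':
--             illegal = True
--         if c == '/' or c == '\\':
--             sep = True
--         if c == '.':
--             ext = ''
--         elif ext is not None:
--             ext += c
--     if n < 2 or illegal:
--         return False
--     if ext is not None and '.' + ext.lower() in _VALID_EXTENSIONS:
--         return True
--     return sep
-- ===== Notes on version B (the rewrite author's own statement) =====
-- stated objective: alternative
-- what changed: Replaces A's staged substring passes (seven illegal-char 'in' scans, 37 endswith tests on the lowered string, and a replace/split/branch separator block) by one fused left-to-right character scan that accumulates the length, an illegal-char flag, a separator flag and the run of characters after the last dot, followed by a single set lookup of that extension.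
import Mathlib
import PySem

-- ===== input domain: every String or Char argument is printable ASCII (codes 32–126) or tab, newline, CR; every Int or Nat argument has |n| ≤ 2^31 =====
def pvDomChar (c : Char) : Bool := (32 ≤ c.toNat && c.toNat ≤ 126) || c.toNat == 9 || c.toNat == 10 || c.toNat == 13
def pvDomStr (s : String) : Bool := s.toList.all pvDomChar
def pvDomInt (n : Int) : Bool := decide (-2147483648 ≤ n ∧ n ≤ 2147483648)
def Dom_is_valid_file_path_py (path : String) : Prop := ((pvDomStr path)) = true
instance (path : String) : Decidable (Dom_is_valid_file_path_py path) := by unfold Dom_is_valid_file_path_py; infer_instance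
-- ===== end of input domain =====

-- B replaces A's staged substring passes (7 illegal-char scans, 37 endswith tests,
-- a replace/split separator block) by ONE fused left-to-right character scan that
-- accumulates length, illegal/separator flags and the run after the last dot.


-- ===== PORT A =====
def pvIllegalChars : List String := ["<", ">", ":", "\"", "|", "?", "*"]

def pvValidExtensions : List String :=
  [".py", ".js", ".ts", ".java", ".cpp", ".c", ".h",
   ".html", ".css", ".md", ".txt", ".json", ".yaml",
   ".yml", ".xml", ".csv", ".sql", ".sh", ".bat",
   ".exe", ".dll", ".so", ".dylib", ".cs", ".go",
   ".rs", ".php", ".rb", ".pl", ".lua", ".swift",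
   ".kt", ".scala", ".m", ".mm", ".fs", ".vb"]

def is_valid_file_path_py (path : String) : Bool :=
  if path == "" || PySem.Str.len path < 2 then false
  else if pvIllegalChars.any (fun ch => PySem.Str.isIn ch path) then false
  else
    let path_lower := PySem.Str.lower path
    if pvValidExtensions.any (fun ext => PySem.Str.endswith path_lower ext) then true
    else if PySem.Str.isIn "/" path || PySem.Str.isIn "\\" path then
      match PySem.Str.split? (PySem.Str.replace path "\\" "/") "/" with
      | some parts =>
        if 2 ≤ parts.length then
          match PySem.List.pyGet? parts (-1) with
          | some last_part => if PySem.Str.isIn "." last_part then true else true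
          | none => false  -- unreachable: split's result is never empty
        else false
      | none => false  -- unreachable: the separator "/" is nonempty
    else false

-- ===== PORT B =====
def pvValidExtSet : PySem.Set String := PySem.Set.ofList
  [".py", ".js", ".ts", ".java", ".cpp", ".c", ".h",
   ".html", ".css", ".md", ".txt", ".json", ".yaml",
   ".yml", ".xml", ".csv", ".sql", ".sh", ".bat",
   ".exe", ".dll", ".so", ".dylib", ".cs", ".go",
   ".rs", ".php", ".rb", ".pl", ".lua", ".swift",
   ".kt", ".scala", ".m", ".mm", ".fs", ".vb"]

-- Source B's loop body: state = (n, illegal, sep, ext); 'c in <1-char-class string>' on a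
-- single character is character membership, ported as list membership.
def pvScanStep (st : Nat × Bool × Bool × Option (List Char)) (c : Char) :
    Nat × Bool × Bool × Option (List Char) :=
  let n := st.1 + 1
  let illegal := if ['<', '>', ':', '"', '|', '?', '*'].contains c then true else st.2.1
  let sep := if c == '/' || c == '\\' then true else st.2.2.1
  let ext :=
    if c == '.' then some []
    else match st.2.2.2 with
      | some e => some (e ++ [c])
      | none => none
  (n, illegal, sep, ext)

def is_valid_file_path_py_alt (path : String) : Bool :=
  let st := path.toList.foldl pvScanStep (0, false, false, none)
  if st.1 < 2 || st.2.1 then false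
  else
    match st.2.2.2 with
    | some e =>
      if pvValidExtSet.contains (String.ofList ('.' :: PySem.Chars.lower e)) then true
      else st.2.2.1
    | none => st.2.2.1

-- ===== PRECONDITION & SPEC =====
def Spec_is_valid_file_path_py (path : String) (out : Bool) : Prop := out = is_valid_file_path_py_alt path
instance (path : String) (out : Bool) : Decidable (Spec_is_valid_file_path_py path out) := by unfold Spec_is_valid_file_path_py; infer_instance

-- ===== CLAIM (what is proved, stated in full; the proofs are below) =====
def Claim_equal_is_valid_file_path_py : Prop := ∀ (path : String), Dom_is_valid_file_path_py path → Spec_is_valid_file_path_py path (is_valid_file_path_py path)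

-- ===== LEMMAS AND PROOFS =====

-- tail after the last '.' (a proof-side characterisation of B's ext accumulator):
-- returns (head, found?, tail) like s.rpartition('.')
def pvRPartitionDot : List Char → List Char × Bool × List Char
  | [] => ([], false, [])
  | c :: t =>
    match pvRPartitionDot t with
    | (h, true, tl) => (c :: h, true, tl)
    | _ => if c = '.' then ([], true, t) else ([], false, c :: t)

theorem pv_singleton_infix (c : Char) (l : List Char) : ([c] <:+: l) ↔ c ∈ l := by
  constructor
  · rintro ⟨a, b, h⟩; subst h; simp
  · intro h
    obtain ⟨a, b, rfl⟩ := List.append_of_mem h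
    exact ⟨a, b, by simp⟩

theorem pv_replace_go_single (o n : Char) (l acc : List Char) (fuel : Nat)
    (h : l.length ≤ fuel) :
    PySem.Chars.replace.go [o] [n] fuel l acc
      = acc.reverse ++ l.map (fun c => if c = o then n else c) := by
  induction l generalizing fuel acc with
  | nil =>
    cases fuel <;> simp [PySem.Chars.replace.go]
  | cons c t ih =>
    cases fuel with
    | zero => simp at h
    | succ f =>
      rw [PySem.Chars.replace.go]
      simp at h
      by_cases hc : c = o
      · subst hc
        simp only [List.isPrefixOf, BEq.refl, Bool.true_and, if_pos,
          List.length_cons, List.length_nil, List.drop_succ_cons, List.drop_zero,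
          List.reverse_cons, List.reverse_nil, List.nil_append]
        rw [ih _ _ h]
        simp
      · have hp : [o].isPrefixOf (c :: t) = false := by
          simp [List.isPrefixOf]; exact fun h' => hc h'.symm
        rw [hp]
        simp only [if_neg Bool.false_ne_true]
        rw [ih _ _ h]
        simp [hc]

theorem pv_replace_single (o n : Char) (l : List Char) :
    PySem.Chars.replace l [o] [n] = l.map (fun c => if c = o then n else c) := by
  rw [PySem.Chars.replace]
  simp only [List.isEmpty_cons, if_neg Bool.false_ne_true]
  rw [pv_replace_go_single o n l [] l.length le_rfl]
  simp

theorem pv_splitOn_go_single (c : Char) (l cur : List Char) (acc : List (List Char)) (fuel : Nat)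
    (h : l.length ≤ fuel) :
    (PySem.Chars.splitOn.go [c] fuel l cur acc).length = acc.length + 1 + l.count c := by
  induction l generalizing fuel cur acc with
  | nil => cases fuel <;> simp [PySem.Chars.splitOn.go]
  | cons c' t ih =>
    cases fuel with
    | zero => simp at h
    | succ f =>
      rw [PySem.Chars.splitOn.go]
      simp at h
      by_cases hc : c = c'
      · subst hc
        simp only [List.isPrefixOf, BEq.refl, Bool.true_and, if_pos,
          List.length_cons, List.length_nil, List.drop_succ_cons, List.drop_zero]
        rw [ih _ _ _ h]
        simp [List.count_cons]
        omega
      · have hp : [c].isPrefixOf (c' :: t) = false := by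
          simp [List.isPrefixOf]; exact hc
        rw [hp]
        simp only [if_neg Bool.false_ne_true]
        rw [ih _ _ _ h]
        simp [List.count_cons]
        exact fun h' => hc h'.symm

theorem pv_splitOn_single_length (c : Char) (l : List Char) :
    (PySem.Chars.splitOn l [c]).length = 1 + l.count c := by
  rw [PySem.Chars.splitOn]
  rw [pv_splitOn_go_single c l [] [] (l.length + 1) (by omega)]
  simp

theorem pv_pyGet_neg_one_isSome {α : Type} (xs : List α) (h : xs ≠ []) :
    ∃ v, PySem.List.pyGet? xs (-1) = some v := by
  have hl : 0 < xs.length := List.length_pos_iff.mpr h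
  have hidx : PySem.List.pyIdx? xs.length (-1) = some (xs.length - 1) := by
    simp [PySem.List.pyIdx?]
    omega
  refine ⟨xs[xs.length - 1]'(by omega), ?_⟩
  rw [PySem.List.pyGet?, hidx]
  simp

theorem pv_rp_false_iff (l : List Char) : (pvRPartitionDot l).2.1 = false ↔ '.' ∉ l := by
  induction l with
  | nil => simp [pvRPartitionDot]
  | cons c t ih =>
    rcases hrp : pvRPartitionDot t with ⟨hh, f, tl⟩
    cases f with
    | true =>
      have hmem : '.' ∈ t := by
        by_contra hm
        have := ih.mpr hm
        rw [hrp] at this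
        simp at this
      simp [pvRPartitionDot, hrp, hmem]
    | false =>
      have hnot : '.' ∉ t := ih.mp (by rw [hrp])
      by_cases hc : c = '.'
      · subst hc
        simp [pvRPartitionDot, hrp]
      · simp [pvRPartitionDot, hrp, hc, hnot]
        exact fun e => hc e.symm

theorem pv_rp_suffix (l : List Char) (h : (pvRPartitionDot l).2.1 = true) :
    ('.' :: (pvRPartitionDot l).2.2) <:+ l ∧ '.' ∉ (pvRPartitionDot l).2.2 := by
  induction l with
  | nil => simp [pvRPartitionDot] at h
  | cons c t ih =>
    rcases hrp : pvRPartitionDot t with ⟨hh, f, tl⟩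
    cases f with
    | true =>
      have := ih (by rw [hrp])
      rw [hrp] at this
      simp only [pvRPartitionDot, hrp]
      exact ⟨this.1.trans (t.suffix_cons c), this.2⟩
    | false =>
      by_cases hc : c = '.'
      · subst hc
        have hnot : '.' ∉ t := pv_rp_false_iff t |>.mp (by rw [hrp])
        simp only [pvRPartitionDot, hrp]
        simp
        exact hnot
      · rw [pvRPartitionDot, hrp] at h
        simp [hc] at h

theorem pv_rp_of_suffix (l t : List Char) (hs : ('.' :: t) <:+ l) (hd : '.' ∉ t) :
    (pvRPartitionDot l).2.1 = true ∧ (pvRPartitionDot l).2.2 = t := by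
  induction l with
  | nil => simp at hs
  | cons c cs ih =>
    rcases hrp : pvRPartitionDot cs with ⟨hh, f, tl⟩
    rcases (List.suffix_cons_iff.mp hs) with heq | hsuf
    · have hc : c = '.' := by injection heq with h1 _; exact h1.symm
      have hcs : cs = t := by injection heq with _ h2; exact h2.symm
      subst hc; subst hcs
      have hf : f = false := by
        have := (pv_rp_false_iff cs).mpr hd
        rw [hrp] at this; exact this
      subst hf
      simp [pvRPartitionDot, hrp]
    · have := ih hsuf
      rw [hrp] at this
      have hf : f = true := this.1
      subst hf
      simp only [pvRPartitionDot, hrp]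
      simpa using this.2

theorem pv_ext_any (L : List Char) (E : List (List Char))
    (hE : ∀ e ∈ E, e.head? = some '.' ∧ '.' ∉ e.tail) :
    E.any (fun e => PySem.Chars.endswith L e)
      = ((pvRPartitionDot L).2.1 && E.contains ('.' :: (pvRPartitionDot L).2.2)) := by
  rw [Bool.eq_iff_iff]
  simp only [List.any_eq_true, Bool.and_eq_true, List.contains_iff_mem]
  constructor
  · rintro ⟨e, he, hend⟩
    obtain ⟨hh, hd⟩ := hE e he
    cases e with
    | nil => simp at hh
    | cons a t =>
      have ha : a = '.' := by simpa using hh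
      subst ha
      have hsuf := (PySem.Chars.endswith_iff _ _).mp hend
      obtain ⟨h1, h2⟩ := pv_rp_of_suffix L t hsuf (by simpa using hd)
      exact ⟨h1, by rw [h2]; exact he⟩
  · rintro ⟨h1, h2⟩
    refine ⟨_, h2, ?_⟩
    exact (PySem.Chars.endswith_iff _ _).mpr (pv_rp_suffix L h1).1

theorem pv_isIn_to_mem (s : String) (c : Char) (h : s.toList = [c]) (L : List Char)
    (hin : PySem.Chars.isIn s.toList L = true) : c ∈ L :=
  (pv_singleton_infix c L).mp (h ▸ (PySem.Chars.isIn_iff_infix _ _).mp hin)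

theorem pv_mem_to_isIn (s : String) (c : Char) (h : s.toList = [c]) (L : List Char)
    (hc : c ∈ L) : PySem.Chars.isIn s.toList L = true :=
  (PySem.Chars.isIn_iff_infix _ _).mpr (h ▸ (pv_singleton_infix c L).mpr hc)

-- lowering a character produces '.' only from '.'
theorem pv_lowerChar_dot_iff (c : Char) : PySem.Chars.lowerChar c = '.' ↔ c = '.' := by
  unfold PySem.Chars.lowerChar
  split_ifs with h
  · have hb : 65 ≤ c.toNat ∧ c.toNat ≤ 90 := by
      unfold PySem.Chars.isupper at h
      simp [Char.le_def] at h
      exact h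
    have h46 : ('.' : Char).toNat = 46 := rfl
    constructor
    · intro he
      exfalso
      have hlt : c.toNat + 32 < 55296 := by omega
      have hv : (Char.ofNat (c.toNat + 32)).toNat = c.toNat + 32 := by
        simp [Char.ofNat, Char.ofNatAux, Nat.isValidChar, hlt]
        omega
      have hn : c.toNat + 32 = ('.' : Char).toNat := by rw [← hv, he]
      omega
    · intro he
      exfalso
      subst he
      simp [h46] at hb
  · exact Iff.rfl

-- rpartition commutes with lowering (found-flag and tail components)
theorem pv_rp_lower (l : List Char) :
    (pvRPartitionDot (PySem.Chars.lower l)).2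
      = ((pvRPartitionDot l).2.1, PySem.Chars.lower (pvRPartitionDot l).2.2) := by
  induction l with
  | nil => simp [pvRPartitionDot, PySem.Chars.lower]
  | cons c t ih =>
    have hlow : PySem.Chars.lower (c :: t) = PySem.Chars.lowerChar c :: PySem.Chars.lower t := by
      simp [PySem.Chars.lower]
    rcases hrp : pvRPartitionDot t with ⟨hh, f, tl⟩
    rcases hrpl : pvRPartitionDot (PySem.Chars.lower t) with ⟨hh', f', tl'⟩
    rw [hrp, hrpl] at ih
    simp only [Prod.mk.injEq] at ih
    cases f with
    | true =>
      rw [ih.1] at hrpl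
      simp [pvRPartitionDot, hlow, hrp, hrpl, ih.2]
    | false =>
      rw [ih.1] at hrpl
      by_cases hc : c = '.'
      · subst hc
        have hd : PySem.Chars.lowerChar '.' = '.' := by decide
        simp [pvRPartitionDot, hlow, hrp, hrpl, hd, ih.2]
      · have hlc : ¬ PySem.Chars.lowerChar c = '.' :=
          fun h => hc ((pv_lowerChar_dot_iff c).mp h)
        simp [pvRPartitionDot, hlow, hrp, hrpl, hc, hlc, ih.2]

-- characterisation of Source B's fused scan
theorem pv_scan_foldl (l : List Char) (n : Nat) (i s : Bool) (e : Option (List Char)) :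
    l.foldl pvScanStep (n, i, s, e)
      = (n + l.length,
         i || l.any (fun c => ['<', '>', ':', '"', '|', '?', '*'].contains c),
         s || l.any (fun c => c == '/' || c == '\\'),
         if (pvRPartitionDot l).2.1 then some (pvRPartitionDot l).2.2
         else e.map (· ++ l)) := by
  induction l generalizing n i s e with
  | nil =>
    cases e <;> simp [pvRPartitionDot]
  | cons c t ih =>
    rw [List.foldl_cons, ih]
    simp only [pvScanStep, Prod.mk.injEq]
    refine ⟨by simp; omega, ?_, ?_, ?_⟩
    · by_cases hcm : ['<', '>', ':', '"', '|', '?', '*'].contains c = true <;>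
        simp [hcm, Bool.or_assoc, Bool.or_comm, Bool.or_left_comm]
    · by_cases hcs : (c == '/' || c == '\\') = true <;>
        simp [hcs, Bool.or_assoc, Bool.or_comm, Bool.or_left_comm]
    · rcases hrp : pvRPartitionDot t with ⟨hh, f, tl⟩
      cases f with
      | true => simp [pvRPartitionDot, hrp]
      | false =>
        by_cases hc : c = '.'
        · subst hc
          simp [pvRPartitionDot, hrp]
        · have hcb : (c == '.') = false := by simp [hc]
          simp only [pvRPartitionDot, hrp, hcb, if_neg Bool.false_ne_true]
          cases e <;> simp [hc]

-- ===== VERDICT (by name: the statement is the Claim_ definition above) =====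
theorem is_valid_file_path_py_spec : Claim_equal_is_valid_file_path_py := by
  intro path _
  unfold Spec_is_valid_file_path_py is_valid_file_path_py is_valid_file_path_py_alt
  rw [pv_scan_foldl]
  simp only [Nat.zero_add, Bool.false_or, Option.map_none]
  by_cases hL : path.length ≤ 1
  · have hlen : PySem.Str.len path < 2 := by
      simp [PySem.Str.len]
      omega
    have hlen' : path.toList.length < 2 := by
      rw [String.length_toList]
      omega
    simp [hlen, hL, hlen']
  · have hlen : ¬ PySem.Str.len path < 2 := by
      simp [PySem.Str.len]
      omega
    have hlen' : ¬ path.toList.length < 2 := by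
      rw [String.length_toList]
      omega
    have hne : ¬ path = "" := by
      intro h; subst h; simp at hL
    -- the illegal-character guards agree
    have hill : pvIllegalChars.any (fun ch => PySem.Chars.isIn ch.toList path.toList)
        = path.toList.any (fun c => ['<', '>', ':', '"', '|', '?', '*'].contains c) := by
      rw [Bool.eq_iff_iff]
      simp only [List.any_eq_true, List.contains_iff_mem]
      constructor
      · rintro ⟨x, hx, hin⟩
        fin_cases hx
        · exact ⟨'<', pv_isIn_to_mem _ '<' rfl _ hin, by decide⟩
        · exact ⟨'>', pv_isIn_to_mem _ '>' rfl _ hin, by decide⟩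
        · exact ⟨':', pv_isIn_to_mem _ ':' rfl _ hin, by decide⟩
        · exact ⟨'"', pv_isIn_to_mem _ '"' rfl _ hin, by decide⟩
        · exact ⟨'|', pv_isIn_to_mem _ '|' rfl _ hin, by decide⟩
        · exact ⟨'?', pv_isIn_to_mem _ '?' rfl _ hin, by decide⟩
        · exact ⟨'*', pv_isIn_to_mem _ '*' rfl _ hin, by decide⟩
      · rintro ⟨c, hc, hcs⟩
        fin_cases hcs
        · exact ⟨"<", by simp [pvIllegalChars], pv_mem_to_isIn _ '<' rfl _ hc⟩
        · exact ⟨">", by simp [pvIllegalChars], pv_mem_to_isIn _ '>' rfl _ hc⟩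
        · exact ⟨":", by simp [pvIllegalChars], pv_mem_to_isIn _ ':' rfl _ hc⟩
        · exact ⟨"\"", by simp [pvIllegalChars], pv_mem_to_isIn _ '"' rfl _ hc⟩
        · exact ⟨"|", by simp [pvIllegalChars], pv_mem_to_isIn _ '|' rfl _ hc⟩
        · exact ⟨"?", by simp [pvIllegalChars], pv_mem_to_isIn _ '?' rfl _ hc⟩
        · exact ⟨"*", by simp [pvIllegalChars], pv_mem_to_isIn _ '*' rfl _ hc⟩
    -- the separator tests agree
    have hsep : (PySem.Chars.isIn ['/'] path.toList || PySem.Chars.isIn ['\\'] path.toList)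
        = path.toList.any (fun c => c == '/' || c == '\\') := by
      rw [Bool.eq_iff_iff]
      simp only [Bool.or_eq_true, List.any_eq_true, beq_iff_eq]
      constructor
      · rintro (h | h)
        · exact ⟨'/', pv_isIn_to_mem "/" '/' rfl _ h, Or.inl rfl⟩
        · exact ⟨'\\', pv_isIn_to_mem "\\" '\\' rfl _ h, Or.inr rfl⟩
      · rintro ⟨c, hc, rfl | rfl⟩
        · exact Or.inl (pv_mem_to_isIn "/" '/' rfl _ hc)
        · exact Or.inr (pv_mem_to_isIn "\\" '\\' rfl _ hc)
    -- the extension checks agree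
    have hE' : ∀ e ∈ pvValidExtensions.map String.toList, e.head? = some '.' ∧ '.' ∉ e.tail := by
      decide
    have hany := pv_ext_any (PySem.Chars.lower path.toList) (pvValidExtensions.map String.toList) hE'
    have hBmem : ∀ x : List Char,
        (String.ofList x ∈ pvValidExtSet) ↔ x ∈ pvValidExtensions.map String.toList := by
      intro x
      have hvs : (pvValidExtSet : List String) = pvValidExtensions := by decide
      rw [hvs, List.mem_map]
      constructor
      · intro h
        exact ⟨_, h, String.toList_ofList⟩
      · rintro ⟨s, hs, heq⟩
        have : String.ofList x = s := by rw [← heq, String.ofList_toList]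
        rwa [this]
    have hrl := pv_rp_lower path.toList
    have hextEq : pvValidExtensions.any
          (fun ext => PySem.Chars.endswith (PySem.Chars.lower path.toList) ext.toList)
        = ((pvRPartitionDot path.toList).2.1 &&
            decide (String.ofList
              ('.' :: PySem.Chars.lower (pvRPartitionDot path.toList).2.2) ∈ pvValidExtSet)) := by
      have h1 : (pvRPartitionDot (PySem.Chars.lower path.toList)).2.1
          = (pvRPartitionDot path.toList).2.1 := by rw [hrl]
      have h2 : (pvRPartitionDot (PySem.Chars.lower path.toList)).2.2
          = PySem.Chars.lower (pvRPartitionDot path.toList).2.2 := by rw [hrl]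
      rw [Bool.eq_iff_iff] at hany ⊢
      simp only [List.any_eq_true, List.mem_map, List.contains_iff_mem, Bool.and_eq_true,
        decide_eq_true_eq, h1, h2, hBmem] at hany ⊢
      constructor
      · rintro ⟨x, hx, hend⟩
        exact hany.mp ⟨x.toList, ⟨x, hx, rfl⟩, hend⟩
      · intro h
        obtain ⟨e, ⟨x, hx, rfl⟩, hend⟩ := hany.mpr h
        exact ⟨x, hx, hend⟩
    -- when a separator occurs, A's replace/split block returns true
    have hsepT : (PySem.Chars.isIn ['/'] path.toList || PySem.Chars.isIn ['\\'] path.toList) = true →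
        (match PySem.Str.split? (PySem.Str.replace path "\\" "/") "/" with
          | some parts =>
            (decide (2 ≤ parts.length) &&
              match PySem.List.pyGet? parts (-1) with
              | some _ => true
              | none => false)
          | none => false) = true := by
      intro hg
      have hrep : (PySem.Str.replace path "\\" "/").toList
          = path.toList.map (fun c => if c = '\\' then '/' else c) := by
        rw [PySem.Str.replace, String.toList_ofList,
          show ("\\" : String).toList = ['\\'] from rfl,
          show ("/" : String).toList = ['/'] from rfl]
        exact pv_replace_single '\\' '/' path.toList
      have hmem : '/' ∈ (PySem.Str.replace path "\\" "/").toList := by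
        rw [hrep]
        rcases Bool.or_eq_true_iff.mp hg with h | h
        · exact List.mem_map.mpr ⟨'/', pv_isIn_to_mem "/" '/' rfl _ h, by decide⟩
        · exact List.mem_map.mpr ⟨'\\', pv_isIn_to_mem "\\" '\\' rfl _ h, by decide⟩
      rw [PySem.Str.split?, PySem.Chars.split?,
        show ("/" : String).toList = ['/'] from rfl]
      simp only [List.isEmpty_cons, if_neg Bool.false_ne_true, Option.map_some]
      have hlen2 : 2 ≤ ((PySem.Chars.splitOn (PySem.Str.replace path "\\" "/").toList
          [ '/' ]).map String.ofList).length := by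
        rw [List.length_map, pv_splitOn_single_length]
        have : 0 < (PySem.Str.replace path "\\" "/").toList.count '/' :=
          List.count_pos_iff.mpr hmem
        omega
      obtain ⟨v, hv⟩ := pv_pyGet_neg_one_isSome
        ((PySem.Chars.splitOn (PySem.Str.replace path "\\" "/").toList ['/']).map String.ofList)
        (by intro h; rw [h] at hlen2; simp at hlen2)
      simp only [hv, hlen2, decide_true, Bool.true_and]
    rcases hf : (pvRPartitionDot path.toList).2.1 with _ | _
    · -- no dot in the path: the decision reduces to the separator test on both sides
      rw [hf] at hextEq
      by_cases hg : (PySem.Chars.isIn ['/'] path.toList || PySem.Chars.isIn ['\\'] path.toList) = true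
      · have hM := hsepT hg
        have hgB : path.toList.any (fun c => c == '/' || c == '\\') = true := by rw [← hsep]; exact hg
        simp [hne, hlen, hill, hextEq, hf, hg, hgB, hM]
      · have hg' : (PySem.Chars.isIn ['/'] path.toList || PySem.Chars.isIn ['\\'] path.toList) = false := by
          simpa using hg
        have hgB : path.toList.any (fun c => c == '/' || c == '\\') = false := by rw [← hsep]; exact hg'
        simp [hne, hlen, hill, hextEq, hg', hgB]
    · -- a dot exists: the extension lookup decides, else fall back to the separator test
      rw [hf] at hextEq
      by_cases hct : (String.ofList
          ('.' :: PySem.Chars.lower (pvRPartitionDot path.toList).2.2) ∈ pvValidExtSet)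
      · simp [hne, hlen, hill, hextEq, hf, hct]
      · by_cases hg : (PySem.Chars.isIn ['/'] path.toList || PySem.Chars.isIn ['\\'] path.toList) = true
        · have hM := hsepT hg
          have hgB : path.toList.any (fun c => c == '/' || c == '\\') = true := by rw [← hsep]; exact hg
          simp [hne, hlen, hill, hextEq, hf, hct, hg, hgB, hM]
        · have hg' : (PySem.Chars.isIn ['/'] path.toList || PySem.Chars.isIn ['\\'] path.toList) = false := by
            simpa using hg
          have hgB : path.toList.any (fun c => c == '/' || c == '\\') = false := by rw [← hsep]; exact hg'
          simp [hne, hlen, hill, hextEq, hf, hct, hg', hgB]
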